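/- GENERATED by farm/mkstatement.py from design/units.tsv (unit `compute_codewords.1`) and the assertions of Vorbis/Spec/Codebook/Codewords.lean — do not edit.
   THE STATEMENT of the proof unit `compute_codewords.1`: segment 1 of `compute_codewords` (25 instructions; entries 0x1081a0;
   exits 0x108218; ranges 0x1081a0-0x108213)
   takes each of its entry assertions to one of its exit assertions (`Vorbis.Spec.compute_codewords.Seg1`), given the contracts of its callees.
   What the names mean: Vorbis/Spec/Basic.lean (the shared hypotheses), Vorbis/Spec/Codebook/Codewords.lean (the assertions). The theorem to prove:
   `theorem compute_codewords_1_ok : Vorbis.Spec.compute_codewords_1.Statement`. -/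
import Vorbis.Spec.Codebook.Codewords
import Vorbis.Spec.Libc
namespace Vorbis.Spec.compute_codewords_1
open X86 X86.User Asan

/-- The statement of unit `compute_codewords.1`. -/
def Statement : Prop :=
  ∀ (Lay : Layout) (_hLay : Lay.hi = 0x1000000) (μ : Microarch) (_hμ : UserX.MicroOK μ) (u₀ : State)
    (_hcode : HasCodeNat Lay u₀ Vorbis.L.compute_codewords.entry Vorbis.Code.code_compute_codewords.nat Vorbis.L.compute_codewords.size)
    (_h_memset : ∀ (others : List Obj) (frames : List (Nat × FrameLayout)), Calls Lay μ Vorbis.WayInv (Vorbis.conv u₀) Vorbis.L.memset.entry (Vorbis.Spec.memset.spec others frames)),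
    Vorbis.Spec.compute_codewords.Seg1 Lay μ u₀

end Vorbis.Spec.compute_codewords_1
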